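-- pv_equiv track=rewrite | github.com/ikhat/TruthTables | truthtables.py | ivan_generator
-- ===== SOURCE A (Python) =====
-- from math import log
--
-- alphabet = 'PQRSTUVWXYZ'
--
-- def ivan_generator(column, iteration=0):
-- 	'''Generate a logical statement with a given truth table column.
--
-- 	column - a binary string representing a column in a logical truth table
--
-- 	If column is of length 2, then this is a truth table for a one-predicate
-- 	statement and we simply output one of the four possible answers.
-- 	Otherwise, split the column into its top and bottom halves, run the function
-- 	on each half to obtain statements A and B respectively and return
-- 	(A and X) or (B and ~X), where X is the next available letter in alphabet
-- 	'''
-- 	base_case = {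
-- 		'11' : '(_ or ~_)',
-- 		'10' : '_',
-- 		'01' : '~_',
-- 		'00' : '(_ and ~_)'
-- 	}
-- 	length = len(column)
-- 	assert set(char for char in column) <= set(['0','1']), 'Input column contains values other than 1 (True) and 0 (False).'
-- 	assert log(length, 2).is_integer(), 'Input column of invalid length. Should be 2^n, where n is the number of predicates.'
-- 	number_of_predicates = int(log(length, 2))
-- 	if length == 2:
-- 		return base_case[column].replace('_', alphabet[iteration])
-- 	else:
-- 		top_half, bottom_half = column[:length//2], column[length//2:]
-- 		if length == 4:
-- 			return '(' + alphabet[iteration] + ' and ' + ivan_generator(top_half, iteration+1) + ') or (~' + alphabet[iteration] + ' and ' + ivan_generator(bottom_half, iteration+1) + ')'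
-- 		else:
-- 			return '(' + alphabet[iteration] + ' and (' + ivan_generator(top_half, iteration+1) + ')) or (~' + alphabet[iteration] + ' and (' + ivan_generator(bottom_half, iteration+1) + '))'
-- ===== SOURCE B (Python) =====
-- from math import log
--
-- alphabet = 'PQRSTUVWXYZ'
--
-- def ivan_generator(column, iteration=0):
-- 	'''Bottom-up rebuild: map length-2 chunks to leaf expressions, then merge
-- 	adjacent pairs round by round until one statement remains.'''
-- 	assert set(char for char in column) <= set(['0','1']), 'Input column contains values other than 1 (True) and 0 (False).'
-- 	assert log(len(column), 2).is_integer(), 'Input column of invalid length. Should be 2^n, where n is the number of predicates.'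
-- 	depth = int(log(len(column), 2))
-- 	base = {'11': '({0} or ~{0})', '10': '{0}', '01': '~{0}', '00': '({0} and ~{0})'}
-- 	leaf = alphabet[iteration + depth - 1]
-- 	exprs = [base[column[i:i + 2]].format(leaf) for i in range(0, len(column), 2)]
-- 	for r in range(depth - 1):
-- 		letter = alphabet[iteration + depth - 2 - r]
-- 		if r == 0:
-- 			exprs = ['({0} and {1}) or (~{0} and {2})'.format(letter, exprs[i], exprs[i + 1])
-- 					 for i in range(0, len(exprs), 2)]
-- 		else:
-- 			exprs = ['({0} and ({1})) or (~{0} and ({2}))'.format(letter, exprs[i], exprs[i + 1])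
-- 					 for i in range(0, len(exprs), 2)]
-- 	return exprs[0]
-- ===== Notes on version B (the rewrite author's own statement) =====
-- stated objective: alternative
-- what changed: Replaced the top-down halving recursion by a bottom-up pass: map length-2 chunks to leaf expressions once, then iteratively merge adjacent pairs round by round (halving the list) until one statement remains.
import Mathlib
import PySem

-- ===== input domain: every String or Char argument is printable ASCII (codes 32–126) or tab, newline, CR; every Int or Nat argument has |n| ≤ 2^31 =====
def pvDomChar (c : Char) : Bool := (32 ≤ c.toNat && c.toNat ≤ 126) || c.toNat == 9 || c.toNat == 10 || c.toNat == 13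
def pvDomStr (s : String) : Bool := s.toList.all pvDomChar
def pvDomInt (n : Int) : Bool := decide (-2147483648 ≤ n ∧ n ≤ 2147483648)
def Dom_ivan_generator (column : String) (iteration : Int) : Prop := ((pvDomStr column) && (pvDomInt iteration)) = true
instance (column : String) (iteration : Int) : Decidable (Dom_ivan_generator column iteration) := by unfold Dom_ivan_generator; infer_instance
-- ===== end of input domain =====

-- B rebuilds the statement bottom-up (leaf chunks, then pairwise merge rounds) instead of
-- A's top-down halving recursion; same return value on Pre_, no speed claim.

-- ===== PORT A =====

-- alphabet[i] as a 1-char list; Python indexing (negative wraps, out of range = IndexError → [] ,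
-- which only happens outside Pre_)
def pvLetter (i : Int) : List Char :=
  match PySem.Str.pyGet? "PQRSTUVWXYZ" i with
  | some c => [c]
  | none => []

-- int(log(n,2)) via fuel recursion (kernel-reducible); exact for the power-of-two lengths Pre_ admits
def pvLog2Aux : Nat → Nat → Nat
  | 0, _ => 0
  | fuel+1, n => if n < 2 then 0 else pvLog2Aux fuel (n / 2) + 1

def pvLog2 (n : Nat) : Nat := pvLog2Aux n n

-- log(n,2).is_integer(): true on the lengths Pre_ admits iff n is a power of two; n = 0 raises
def pvIsPow2 (n : Nat) : Bool := n != 0 && (2 ^ pvLog2 n == n)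

def pvBinary (l : List Char) : Bool := l.all (fun c => c == '0' || c == '1')

-- literal transliteration of A: asserts → [] (raise), base-case dict, recursion on halves
def ivanAux (l : List Char) (it : Int) : List Char :=
  if pvBinary l = false then []                 -- assert: non-binary character → AssertionError
  else if pvIsPow2 l.length = false then []     -- assert: not a power of two (len 0: ValueError)
  else if l.length = 2 then
    (if l = ['1', '1'] then ['('] ++ pvLetter it ++ " or ~".toList ++ pvLetter it ++ [')']
     else if l = ['1', '0'] then pvLetter it
     else if l = ['0', '1'] then ['~'] ++ pvLetter it
     else if l = ['0', '0'] then ['('] ++ pvLetter it ++ " and ~".toList ++ pvLetter it ++ [')']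
     else [])                                   -- unreachable: binary check passed
  else if l.length = 1 then []             -- recursive call on empty top half → ValueError
  else
    let t := l.take (l.length / 2)
    let b := l.drop (l.length / 2)
    if l.length = 4 then
      ['('] ++ pvLetter it ++ " and ".toList ++ ivanAux t (it + 1) ++ ") or (~".toList ++
        pvLetter it ++ " and ".toList ++ ivanAux b (it + 1) ++ [')']
    else
      ['('] ++ pvLetter it ++ " and (".toList ++ ivanAux t (it + 1) ++ ")) or (~".toList ++
        pvLetter it ++ " and (".toList ++ ivanAux b (it + 1) ++ [')', ')']
termination_by l.length
decreasing_by
  all_goals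
    simp only [List.length_take, List.length_drop]
    have hne : l.length ≠ 0 := by
      intro h0; simp [pvIsPow2, h0] at *
    omega

def ivan_generator (column : String) (iteration : Int) : String :=
  String.ofList (ivanAux column.toList iteration)

-- ===== PORT B =====

-- leaf expressions: one per consecutive length-2 chunk (non-binary / odd tail = KeyError → stop; outside Pre_)
def pvLeaves (L : List Char) : List Char → List (List Char)
  | a :: b :: rest =>
    if a = '1' ∧ b = '1' then (['('] ++ L ++ " or ~".toList ++ L ++ [')']) :: pvLeaves L rest
    else if a = '1' ∧ b = '0' then L :: pvLeaves L rest
    else if a = '0' ∧ b = '1' then (['~'] ++ L) :: pvLeaves L rest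
    else if a = '0' ∧ b = '0' then (['('] ++ L ++ " and ~".toList ++ L ++ [')']) :: pvLeaves L rest
    else []
  | _ => []

def pvFmt (L : List Char) (wrap : Bool) (a b : List Char) : List Char :=
  if wrap then
    ['('] ++ L ++ " and (".toList ++ a ++ ")) or (~".toList ++ L ++ " and (".toList ++ b ++ [')', ')']
  else
    ['('] ++ L ++ " and ".toList ++ a ++ ") or (~".toList ++ L ++ " and ".toList ++ b ++ [')']

-- one merge round: adjacent pairs
def pvMerge (L : List Char) (wrap : Bool) : List (List Char) → List (List Char)
  | a :: b :: rest => pvFmt L wrap a b :: pvMerge L wrap rest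
  | _ => []

-- the for-loop over r in range(depth-1); s = iteration + depth - 2
def pvRounds (s : Int) (r : Nat) : Nat → List (List Char) → List (List Char)
  | 0, es => es
  | k + 1, es => pvRounds s (r + 1) k (pvMerge (pvLetter (s - r)) (r != 0) es)

def ivan_generator_alt (column : String) (iteration : Int) : String :=
  let l := column.toList
  if pvBinary l = false then String.ofList []       -- assert → AssertionError
  else if pvIsPow2 l.length = false then String.ofList []  -- assert → error
  else
    let d := pvLog2 l.length
    let leaves := pvLeaves (pvLetter (iteration + (d : Int) - 1)) l
    String.ofList ((pvRounds (iteration + (d : Int) - 2) 0 (d - 1) leaves).headD [])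

-- ===== PRECONDITION & SPEC =====
-- Pre_ = exactly where the Python A returns: binary characters, length 2^d with d ≥ 1
-- (length 1 passes A's asserts but raises ValueError recursing on the empty top half; length 0
-- raises ValueError in log), and every alphabet index iteration..iteration+d-1 a valid Python
-- index of the 11-letter alphabet, i.e. in [-11, 10] (otherwise IndexError).
def Pre_ivan_generator (column : String) (iteration : Int) : Prop :=
  pvBinary column.toList = true ∧
  ∃ d ∈ Finset.Icc (1 : Nat) 22, column.toList.length = 2 ^ d ∧
    -11 ≤ iteration ∧ iteration + (d : Int) ≤ 11

instance (column : String) (iteration : Int) : Decidable (Pre_ivan_generator column iteration) := by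
  unfold Pre_ivan_generator; infer_instance

def pvWitness_ivan_generator : String × Int := ("1001", 0)

def Spec_ivan_generator (column : String) (iteration : Int) (out : String) : Prop :=
  out = ivan_generator_alt column iteration

instance (column : String) (iteration : Int) (out : String) :
    Decidable (Spec_ivan_generator column iteration out) := by
  unfold Spec_ivan_generator; infer_instance

-- ===== CLAIM (what is proved, stated in full; the proofs are below) =====
def Claim_equal_ivan_generator : Prop :=
  ∀ (column : String) (iteration : Int), Dom_ivan_generator column iteration →
    Pre_ivan_generator column iteration →
    Spec_ivan_generator column iteration (ivan_generator column iteration)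

-- ===== LEMMAS AND PROOFS =====

theorem pvLog2Aux_pow (d : Nat) : ∀ fuel, 2 ^ d ≤ fuel → pvLog2Aux fuel (2 ^ d) = d := by
  induction d with
  | zero => intro fuel h; match fuel, h with | f + 1, _ => simp [pvLog2Aux]
  | succ d ih =>
    intro fuel h
    have h2 : 2 ≤ 2 ^ (d + 1) := by
      have := Nat.one_le_two_pow (n := d); rw [pow_succ]; omega
    match fuel, (by omega : 1 ≤ fuel) with
    | f + 1, _ =>
      have hdiv : 2 ^ (d + 1) / 2 = 2 ^ d := by rw [pow_succ, Nat.mul_div_cancel _ (by norm_num)]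
      have hle : 2 ^ d ≤ f := by have := Nat.one_le_two_pow (n := d); rw [pow_succ] at h; omega
      simp only [pvLog2Aux, if_neg (by omega : ¬ 2 ^ (d + 1) < 2), hdiv, ih f hle]

theorem pvLog2_pow (d : Nat) : pvLog2 (2 ^ d) = d :=
  pvLog2Aux_pow d _ le_rfl

theorem pvIsPow2_pow (d : Nat) : pvIsPow2 (2 ^ d) = true := by
  simp [pvIsPow2, pvLog2_pow]

theorem pvBinary_true {l : List Char} (h : ∀ c ∈ l, c = '0' ∨ c = '1') : pvBinary l = true := by
  simp only [pvBinary, List.all_eq_true]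
  intro c hc
  rcases h c hc with h' | h' <;> simp [h']

theorem pvMerge_append (L : List Char) (w : Bool) :
    ∀ (n : Nat) (xs ys : List (List Char)), xs.length = 2 * n →
      pvMerge L w (xs ++ ys) = pvMerge L w xs ++ pvMerge L w ys := by
  intro n
  induction n with
  | zero => intro xs ys h; rw [List.length_eq_zero_iff.mp h]; rfl
  | succ n ih =>
    intro xs ys h
    match xs, h with
    | a :: b :: rest, h =>
      simp only [List.cons_append, pvMerge, List.length_cons] at *
      rw [ih rest ys (by omega)]

theorem pvMerge_length (L : List Char) (w : Bool) :
    ∀ (n : Nat) (xs : List (List Char)), xs.length = 2 * n → (pvMerge L w xs).length = n := by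
  intro n
  induction n with
  | zero => intro xs h; rw [List.length_eq_zero_iff.mp h]; rfl
  | succ n ih =>
    intro xs h
    match xs, h with
    | a :: b :: rest, h =>
      simp only [pvMerge, List.length_cons] at *
      rw [ih rest (by omega)]

theorem pvRounds_append (s : Int) :
    ∀ (k r : Nat) (xs ys : List (List Char)), xs.length = 2 ^ k →
      pvRounds s r k (xs ++ ys) = pvRounds s r k xs ++ pvRounds s r k ys := by
  intro k
  induction k with
  | zero => intro r xs ys _; rfl
  | succ k ih =>
    intro r xs ys h
    have hx : xs.length = 2 * 2 ^ k := by rw [h, pow_succ]; ring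
    simp only [pvRounds]
    rw [pvMerge_append _ _ _ _ _ hx, ih (r + 1) _ _ (pvMerge_length _ _ _ _ hx)]

theorem pvRounds_peel (s : Int) :
    ∀ (k r : Nat) (es : List (List Char)),
      pvRounds s r (k + 1) es =
        pvMerge (pvLetter (s - (r + k))) ((r + k) != 0) (pvRounds s r k es) := by
  intro k
  induction k with
  | zero => intro r es; simp [pvRounds]
  | succ k ih =>
    intro r es
    have : pvRounds s r (k + 1 + 1) es =
        pvRounds s (r + 1) (k + 1) (pvMerge (pvLetter (s - r)) (r != 0) es) := rfl
    rw [this, ih (r + 1)]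
    have harg : s - (↑(r + 1) + ↑k) = s - (↑r + ↑(k + 1)) := by push_cast; ring
    have hb : ((r + 1 + k) != 0) = ((r + (k + 1)) != 0) := by
      simp [Nat.add_comm, Nat.add_left_comm]
    rw [harg, hb]
    rfl

theorem pvLeaves_append (L : List Char) :
    ∀ (n : Nat) (xs ys : List Char), (∀ c ∈ xs, c = '0' ∨ c = '1') → xs.length = 2 * n →
      pvLeaves L (xs ++ ys) = pvLeaves L xs ++ pvLeaves L ys := by
  intro n
  induction n with
  | zero => intro xs ys _ h; rw [List.length_eq_zero_iff.mp h]; rfl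
  | succ n ih =>
    intro xs ys hb h
    match xs, h with
    | a :: b :: rest, h =>
      have hrest : ∀ c ∈ rest, c = '0' ∨ c = '1' := fun c hc => hb c (by simp [hc])
      have ha := hb a (by simp); have hbb := hb b (by simp)
      have hih := ih rest ys hrest (by simp at h; omega)
      rcases ha with rfl | rfl <;> rcases hbb with rfl | rfl <;>
        simp [pvLeaves, hih]

theorem pvLeaves_length (L : List Char) :
    ∀ (n : Nat) (xs : List Char), (∀ c ∈ xs, c = '0' ∨ c = '1') → xs.length = 2 * n →
      (pvLeaves L xs).length = n := by
  intro n
  induction n with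
  | zero => intro xs _ h; rw [List.length_eq_zero_iff.mp h]; rfl
  | succ n ih =>
    intro xs hb h
    match xs, h with
    | a :: b :: rest, h =>
      have hrest : ∀ c ∈ rest, c = '0' ∨ c = '1' := fun c hc => hb c (by simp [hc])
      have ha := hb a (by simp); have hbb := hb b (by simp)
      have hih := ih rest hrest (by simp at h; omega)
      rcases ha with rfl | rfl <;> rcases hbb with rfl | rfl <;>
        simp [pvLeaves, hih]

-- bottom-up pipeline = top-down recursion, for a binary column of length 2^(d+1)
theorem pvMain :
    ∀ (d : Nat) (l : List Char) (it : Int), (∀ c ∈ l, c = '0' ∨ c = '1') →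
      l.length = 2 ^ (d + 1) →
      pvRounds (it + (d : Int) - 1) 0 d (pvLeaves (pvLetter (it + (d : Int))) l) = [ivanAux l it] := by
  intro d
  induction d with
  | zero =>
    intro l it hb hl
    match l, hl with
    | [a, b], _ =>
      have ha := hb a (by simp); have hbb := hb b (by simp)
      rcases ha with rfl | rfl <;> rcases hbb with rfl | rfl <;>
        simp [pvRounds, pvLeaves, ivanAux, pvBinary, pvIsPow2, pvLog2, pvLog2Aux]
  | succ d ih =>
    intro l it hb hl
    have hm : l.length / 2 = 2 ^ (d + 1) := by
      rw [hl, pow_succ, Nat.mul_div_cancel _ (by norm_num)]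
    set t := l.take (l.length / 2) with ht
    set bo := l.drop (l.length / 2) with hbo
    have hsplit : l = t ++ bo := (List.take_append_drop _ _).symm
    have hlt : t.length = 2 ^ (d + 1) := by
      rw [ht, List.length_take, hm, hl]; simp [pow_succ]
    have hlb : bo.length = 2 ^ (d + 1) := by
      rw [hbo, List.length_drop, hm, hl, pow_succ]; omega
    have hbt : ∀ c ∈ t, c = '0' ∨ c = '1' := fun c hc => hb c (List.mem_of_mem_take hc)
    have hbb : ∀ c ∈ bo, c = '0' ∨ c = '1' := fun c hc => hb c (List.mem_of_mem_drop hc)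
    -- left side: split leaves, peel the last round, split the remaining rounds, apply IH twice
    have hleafsplit : pvLeaves (pvLetter (it + (↑d + 1))) l =
        pvLeaves (pvLetter (it + (↑d + 1))) t ++ pvLeaves (pvLetter (it + (↑d + 1))) bo := by
      conv_lhs => rw [hsplit]
      exact pvLeaves_append _ (2 ^ d) t bo hbt (by rw [hlt, pow_succ]; ring)
    have hlenlt : (pvLeaves (pvLetter (it + (↑d + 1))) t).length = 2 ^ d :=
      pvLeaves_length _ (2 ^ d) t hbt (by rw [hlt, pow_succ]; ring)
    have hIHt := ih t (it + 1) hbt hlt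
    have hIHb := ih bo (it + 1) hbb hlb
    have e1 : it + 1 + (d : Int) - 1 = it + (d : Int) := by ring
    have e2 : it + 1 + (d : Int) = it + ((d : Int) + 1) := by ring
    rw [e1, e2] at hIHt hIHb
    have key : pvRounds (it + (↑(d + 1) : Int) - 1) 0 (d + 1)
        (pvLeaves (pvLetter (it + (↑(d + 1) : Int))) l) =
        pvMerge (pvLetter it) (d != 0) [ivanAux t (it + 1), ivanAux bo (it + 1)] := by
      push_cast
      rw [hleafsplit, pvRounds_peel]
      simp only [Nat.cast_zero, zero_add]
      rw [show it + ((d : Int) + 1) - 1 = it + (d : Int) from by ring]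
      rw [pvRounds_append _ _ _ _ _ hlenlt, hIHt, hIHb]
      rw [show it + (d : Int) - (d : Int) = it from by ring]
      rfl
    rw [key]
    -- right side: unfold ivanAux once
    have hbin : pvBinary l = true := pvBinary_true hb
    have hpow : pvIsPow2 l.length = true := by rw [hl]; exact pvIsPow2_pow _
    have h4 : 4 ≤ l.length := by
      rw [hl]; calc (4 : Nat) = 2 ^ 2 := rfl
        _ ≤ 2 ^ (d + 2) := Nat.pow_le_pow_right (by norm_num) (by omega)
    conv_rhs => rw [ivanAux]
    simp only [hbin, hpow, Bool.true_eq_false, if_false]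
    rw [if_neg (by omega : ¬ l.length = 2), if_neg (by omega : ¬ l.length = 1)]
    by_cases hd : d = 0
    · subst hd
      rw [if_pos (by rw [hl]; rfl : l.length = 4)]
      simp [pvMerge, pvFmt, ht, hbo]
    · have : ¬ l.length = 4 := by
        rw [hl]
        have : 2 ^ 3 ≤ 2 ^ (d + 1 + 1) := Nat.pow_le_pow_right (by norm_num) (by omega)
        omega
      rw [if_neg this]
      simp [pvMerge, pvFmt, hd, ht, hbo]

-- ===== VERDICT (by name: the statement is the Claim_ definition above) =====
theorem ivan_generator_spec : Claim_equal_ivan_generator := by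
  intro column iteration _hdom hpre
  obtain ⟨hbin, d, hd, hlen, -, -⟩ := hpre
  rw [Finset.mem_Icc] at hd
  have hb : ∀ c ∈ column.toList, c = '0' ∨ c = '1' := by
    simpa [pvBinary, List.all_eq_true] using hbin
  have hlog : pvLog2 column.toList.length = d := by rw [hlen, pvLog2_pow]
  unfold Spec_ivan_generator ivan_generator ivan_generator_alt
  have hpos : column.toList.length ≠ 0 := by
    rw [hlen]; have := Nat.one_le_two_pow (n := d); omega
  have hpow : pvIsPow2 column.toList.length = true := by
    simp only [pvIsPow2, Bool.and_eq_true, bne_iff_ne, ne_eq, beq_iff_eq]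
    exact ⟨hpos, by rw [hlog, hlen]⟩
  simp only [hbin, hpow, Bool.true_eq_false, if_false]
  obtain ⟨e, he⟩ : ∃ e, pvLog2 column.toList.length = e + 1 :=
    ⟨d - 1, by omega⟩
  have hmain := pvMain e column.toList iteration hb (by rw [hlen]; congr 1; omega)
  have e1 : iteration + (↑(pvLog2 column.toList.length) : Int) - 2 = iteration + (e : Int) - 1 := by
    rw [he]; push_cast; ring
  have e2 : iteration + (↑(pvLog2 column.toList.length) : Int) - 1 = iteration + (e : Int) := by
    rw [he]; push_cast; ring
  rw [e1, e2, he, Nat.add_sub_cancel, hmain]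
  rfl
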